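-- pv_equiv track=rewrite | github.com/acm-uofsc/codeathon-f22-upper | TaylorSwiftSequence/python/best.py | sol_help
-- ===== SOURCE A (Python) =====
-- def sol_help(n,arr,B,U):
--   if n < B: return n,arr
--
--   if arr[n-B] is None:
--     s = 0
--     for i in range(1,B+1):
--       ret,arr = sol_help(n-i,arr,B,U)
--       s += ret
--     arr[n-B] = s
--     return s,arr
--
--   else:
--     return arr[n-B],arr
-- ===== SOURCE B (Python) =====
-- def sol_help(n, arr, B, U):
--   if n < B:
--     return n, arr
--   if arr[n - B] is not None:
--     return arr[n - B], arr
--   # The memoized recursion touches exactly the cells m-B for m in one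
--   # contiguous segment [L, n]; find L by a single downward scan.
--   L = n
--   m = n
--   while m >= B and m >= L:
--     if arr[m - B] is None:
--       L = min(L, m - B)
--     m -= 1
--   # Value of position k: k below B, else its memo cell (filled by then).
--   def val(k):
--     return k if k < B else arr[k - B]
--   # Fill the segment bottom-up keeping a sliding-window sum S of the
--   # previous B values; every still-missing cell gets the current S.
--   start = L + B
--   S = sum(val(k) for k in range(start - B, start))
--   for m in range(start, n + 1):
--     if arr[m - B] is None:
--       arr[m - B] = S
--     S += arr[m - B] - val(m - B)
--   return arr[n - B], arr
-- ===== Notes on version B (the rewrite author's own statement) =====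
-- stated objective: alternative
-- what changed: Replaces A's memoized top-down recursion (each missing cell computed as a sum of B recursive calls) by a single downward scan that finds the lower end of the touched segment and one bottom-up pass that fills each missing cell from a sliding-window sum of the previous B values.
-- outside the precondition, e.g. on sol_help(1, [None, None, None], -1, 0): A returns (0, [None, None, 0]), B raises TypeError
import Mathlib
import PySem

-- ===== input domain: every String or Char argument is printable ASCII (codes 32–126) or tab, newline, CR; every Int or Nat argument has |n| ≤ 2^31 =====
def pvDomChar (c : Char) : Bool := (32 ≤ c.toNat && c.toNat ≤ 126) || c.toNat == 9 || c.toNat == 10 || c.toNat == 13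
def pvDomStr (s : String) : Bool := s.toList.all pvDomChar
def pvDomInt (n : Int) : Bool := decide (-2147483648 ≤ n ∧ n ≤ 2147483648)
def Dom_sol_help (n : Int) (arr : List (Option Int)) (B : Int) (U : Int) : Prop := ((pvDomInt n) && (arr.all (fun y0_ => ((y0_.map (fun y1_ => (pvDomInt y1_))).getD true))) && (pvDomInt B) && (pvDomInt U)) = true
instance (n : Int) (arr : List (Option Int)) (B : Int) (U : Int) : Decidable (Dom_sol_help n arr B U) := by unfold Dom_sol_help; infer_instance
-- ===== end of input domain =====

-- B replaces A's memoized top-down recursion by a downward scan plus a bottom-up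
-- sliding-window fill of the touched segment; both mutate arr in Python in the same way,
-- and the pair (return value, final arr) is what is proved equal here.


-- ===== PORT A =====
def sol_help (n : Int) (arr : List (Option Int)) (B : Int) (U : Int) : Int × List (Option Int) :=
  if _h : n < B then (n, arr)
  else
    match PySem.List.pyGet? arr (n - B) with
    | none => (0, arr)  -- Python raises IndexError here; excluded by Pre_
    | some (some v) => (v, arr)
    | some none =>
        let r := ((PySem.List.pyRange 1 (B+1) 1).attach).foldl
          (fun (acc : Int × List (Option Int)) i =>
            let p := sol_help (n - i.1) acc.2 B U
            (acc.1 + p.1, p.2)) ((0 : Int), arr)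
        (r.1, r.2.set (n - B).toNat (some r.1))
termination_by (n - B + 1).toNat
decreasing_by
  have := (PySem.List.mem_pyRange_one.1 i.2).1
  omega

-- ===== PORT B =====
-- the downward scan that finds the lower end L of the touched segment
def altScan (arr : List (Option Int)) (B : Int) (m : Int) (L : Int) : Int :=
  if _h : B ≤ m ∧ L ≤ m then
    altScan arr B (m-1)
      (if (PySem.List.pyGet? arr (m - B)).join = none then min L (m - B) else L)
  else L
termination_by (m - B + 1).toNat
decreasing_by omega

-- value of a node: k below B, else its memo cell (getD 0 totalizes a read Source B never
-- performs on a None/out-of-range cell inside Pre_)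
def altVal (arr : List (Option Int)) (B : Int) (k : Int) : Int :=
  if k < B then k else ((PySem.List.pyGet? arr (k - B)).join).getD 0

def sol_help_alt (n : Int) (arr : List (Option Int)) (B : Int) (U : Int) : Int × List (Option Int) :=
  if n < B then (n, arr)
  else
    match PySem.List.pyGet? arr (n - B) with
    | none => (0, arr)  -- Python raises IndexError here; excluded by Pre_
    | some (some v) => (v, arr)
    | some none =>
        let L := altScan arr B n n
        let start := L + B
        let S0 := ((PySem.List.pyRange (start - B) start 1).map (altVal arr B)).sum
        let r := (PySem.List.pyRange start (n+1) 1).foldl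
          (fun (acc : Int × List (Option Int)) m =>
            let a' := if (PySem.List.pyGet? acc.2 (m - B)).join = none
                      then acc.2.set (m - B).toNat (some acc.1) else acc.2
            (acc.1 + ((PySem.List.pyGet? a' (m - B)).join).getD 0 - altVal a' B (m - B), a'))
          (S0, arr)
        (((PySem.List.pyGet? r.2 (n - B)).join).getD 0, r.2)

-- ===== PRECONDITION & SPEC =====
-- Pre_ excludes (a) inputs where A raises IndexError (n ≥ B with n-B out of range; the
-- recursion reads nothing beyond n-B), and (b) the degenerate negative window B < 0 with
-- n ≥ B and an empty memo cell at n-B — outside the recurrence's natural domain — where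
-- A returns 0 from an empty range while B's window arithmetic raises.
def Pre_sol_help (n : Int) (arr : List (Option Int)) (B : Int) (U : Int) : Prop :=
  n < B ∨ (0 ≤ B ∧ n - B < (arr.length : Int)) ∨
    (0 ≤ n - B ∧ n - B < (arr.length : Int) ∧ (PySem.List.pyGet? arr (n - B)).join ≠ none)
instance (n : Int) (arr : List (Option Int)) (B : Int) (U : Int) : Decidable (Pre_sol_help n arr B U) := by unfold Pre_sol_help; infer_instance

def pvWitness_sol_help : Int × List (Option Int) × Int × Int := (3, ([none, none], 2, 0))

def Spec_sol_help (n : Int) (arr : List (Option Int)) (B : Int) (U : Int) (out : Int × List (Option Int)) : Prop := out = sol_help_alt n arr B U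
instance (n : Int) (arr : List (Option Int)) (B : Int) (U : Int) (out : Int × List (Option Int)) : Decidable (Spec_sol_help n arr B U out) := by unfold Spec_sol_help; infer_instance

-- ===== CLAIM (what is proved, stated in full; the proofs are below) =====
def Claim_equal_sol_help : Prop := ∀ (n : Int) (arr : List (Option Int)) (B : Int) (U : Int), Dom_sol_help n arr B U → Pre_sol_help n arr B U → Spec_sol_help n arr B U (sol_help n arr B U)

-- ===== LEMMAS AND PROOFS =====

-- memo cell of position p (p = node - B); `none` also for out-of-range p
def cell (arr : List (Option Int)) (p : Int) : Option Int := (PySem.List.pyGet? arr p).join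

theorem cell_eq_getD (arr : List (Option Int)) (p : Int) (hp : 0 ≤ p) :
    cell arr p = arr.getD p.toNat none := by
  unfold cell
  rw [PySem.List.pyGet?_of_nonneg arr hp, List.getD_eq_getElem?_getD]
  cases arr[p.toNat]? <;> rfl

theorem cell_oob (arr : List (Option Int)) (p : Int) (hp : (arr.length : Int) ≤ p) :
    cell arr p = none := by
  have h0 : 0 ≤ p := le_trans (by positivity) hp
  rw [cell_eq_getD _ _ h0, List.getD_eq_getElem?_getD, List.getElem?_eq_none (by omega)]
  rfl

-- the specification value of node m (what the memoized recurrence computes)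
def V (B : Int) (arr : List (Option Int)) (m : Int) : Int :=
  if _h : m < B then m
  else match cell arr (m - B) with
    | some v => v
    | none => (((PySem.List.pyRange 1 (B+1) 1).attach).map (fun i => V B arr (m - i.1))).sum
termination_by (m - B + 1).toNat
decreasing_by
  have := (PySem.List.mem_pyRange_one.1 i.2).1
  omega

theorem V_base {B : Int} (arr : List (Option Int)) {m : Int} (h : m < B) : V B arr m = m := by
  rw [V]; simp [h]

theorem V_memo {B : Int} (arr : List (Option Int)) {m : Int} {v : Int} (h : ¬ m < B)
    (hc : cell arr (m - B) = some v) : V B arr m = v := by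
  rw [V]; simp [h, hc]

theorem V_blank {B : Int} (arr : List (Option Int)) {m : Int} (h : ¬ m < B)
    (hc : cell arr (m - B) = none) :
    V B arr m = ((PySem.List.pyRange 1 (B+1) 1).map (fun i => V B arr (m - i))).sum := by
  rw [V]; simp [h, hc]

-- arr' extends arr by filling some None cells with their specification values
def VExt (B : Int) (arr arr' : List (Option Int)) : Prop :=
  arr'.length = arr.length ∧ ∀ p : Int, 0 ≤ p → p < (arr.length : Int) →
    cell arr' p = cell arr p ∨ (cell arr p = none ∧ cell arr' p = some (V B arr (p + B)))

theorem VExt_refl (B : Int) (arr : List (Option Int)) : VExt B arr arr := by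
  exact ⟨rfl, fun p _ _ => Or.inl rfl⟩

theorem V_VExt {B : Int} {arr arr' : List (Option Int)} (h : VExt B arr arr') :
    ∀ m, V B arr' m = V B arr m := by
  have main : ∀ k : Nat, ∀ m : Int, (m - B + 1).toNat = k → V B arr' m = V B arr m := by
    intro k
    induction k using Nat.strong_induction_on with
    | _ k IH =>
      intro m hk
      by_cases hm : m < B
      · rw [V_base _ hm, V_base _ hm]
      · have h0 : (0:Int) ≤ m - B := by omega
        have hsum : cell arr (m - B) = none → cell arr' (m - B) = none →
            V B arr' m = V B arr m := by
          intro hc hc'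
          rw [V_blank _ hm hc, V_blank _ hm hc']
          congr 1
          refine List.map_congr_left (fun i hi => ?_)
          have hi' := PySem.List.mem_pyRange_one.1 hi
          exact IH ((m - i) - B + 1).toNat (by omega) (m - i) rfl
        by_cases hl : m - B < (arr.length : Int)
        · rcases h.2 (m - B) h0 hl with heq | ⟨hn, hs⟩
          · cases hc : cell arr (m - B) with
            | some v => rw [V_memo _ hm (heq.trans hc), V_memo _ hm hc]
            | none => exact hsum hc (heq.trans hc)
          · have hm' : (m - B) + B = m := by omega
            rw [hm'] at hs
            rw [V_memo _ hm hs, V_blank _ hm hn]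
        · have hc : cell arr (m - B) = none := cell_oob _ _ (by omega)
          have hc' : cell arr' (m - B) = none := cell_oob _ _ (by rw [h.1]; omega)
          exact hsum hc hc'
  exact fun m => main _ m rfl

theorem VExt_trans {B : Int} {a b c : List (Option Int)} (h1 : VExt B a b) (h2 : VExt B b c) :
    VExt B a c := by
  refine ⟨h2.1.trans h1.1, fun p hp hl => ?_⟩
  have hl' : p < (b.length : Int) := by rw [h1.1]; exact hl
  rcases h2.2 p hp hl' with heq | ⟨hn, hs⟩
  · rcases h1.2 p hp hl with heq1 | ⟨hn1, hs1⟩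
    · exact Or.inl (heq.trans heq1)
    · exact Or.inr ⟨hn1, heq.trans hs1⟩
  · rcases h1.2 p hp hl with heq1 | ⟨hn1, hs1⟩
    · exact Or.inr ⟨heq1 ▸ hn, by rw [hs, V_VExt h1]⟩
    · exact absurd hs1 (by rw [hn]; simp)

theorem VExt_cell_some {B : Int} {arr arr' : List (Option Int)} (h : VExt B arr arr')
    {p : Int} {v : Int} (hp : 0 ≤ p) (hc : cell arr p = some v) : cell arr' p = some v := by
  by_cases hl : p < (arr.length : Int)
  · rcases h.2 p hp hl with heq | ⟨hn, _⟩
    · rw [heq, hc]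
    · rw [hn] at hc; cases hc
  · rw [cell_oob _ _ (by omega)] at hc; cases hc

theorem VExt_cell_none {B : Int} {arr arr' : List (Option Int)} (h : VExt B arr arr')
    {p : Int} (hp : 0 ≤ p) (hc : cell arr' p = none) : cell arr p = none := by
  by_cases hl : p < (arr.length : Int)
  · rcases h.2 p hp hl with heq | ⟨hn, _⟩
    · rw [← heq, hc]
    · exact hn
  · exact cell_oob _ _ (by omega)

theorem VExt_cell_val {B : Int} {arr arr' : List (Option Int)} (h : VExt B arr arr')
    {p : Int} (hp : 0 ≤ p) (hne : cell arr' p ≠ cell arr p) :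
    cell arr p = none ∧ cell arr' p = some (V B arr (p + B)) := by
  by_cases hl : p < (arr.length : Int)
  · rcases h.2 p hp hl with heq | hv
    · exact absurd heq hne
    · exact hv
  · exact absurd (by rw [cell_oob arr' p (by rw [h.1]; omega), cell_oob arr p (by omega)]) hne

-- closure property of a lower bound l for the touched segment
def Closed (arr : List (Option Int)) (B n l : Int) : Prop :=
  ∀ m, l ≤ m → m ≤ n → B ≤ m → cell arr (m - B) = none → l ≤ m - B

theorem scan_le (arr : List (Option Int)) (B : Int) : ∀ m L, altScan arr B m L ≤ L := by
  intro m L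
  induction m, L using altScan.induct arr B with
  | case1 m L h hrec =>
    rw [altScan, dif_pos h]
    refine le_trans hrec ?_
    split <;> omega
  | case2 m L h => rw [altScan, dif_neg h]

theorem scan_nonneg (arr : List (Option Int)) {B : Int} (hB : 0 ≤ B) :
    ∀ m L, 0 ≤ L → 0 ≤ altScan arr B m L := by
  intro m L
  induction m, L using altScan.induct arr B with
  | case1 m L h hrec =>
    intro hL
    rw [altScan, dif_pos h]
    exact hrec (by split <;> omega)
  | case2 m L h => intro hL; rw [altScan, dif_neg h]; exact hL

theorem scan_le_top (arr : List (Option Int)) {B n : Int} (hn : B ≤ n)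
    (hc : cell arr (n - B) = none) : altScan arr B n n ≤ n - B := by
  have hcj : (PySem.List.pyGet? arr (n - B)).join = none := hc
  rw [altScan, dif_pos ⟨hn, le_rfl⟩, if_pos hcj]
  exact le_trans (scan_le arr B _ _) (by omega)

theorem scan_closed_gen (arr : List (Option Int)) (B n : Int) :
    ∀ m L, m ≤ n →
      (∀ m', m < m' → m' ≤ n → B ≤ m' → cell arr (m' - B) = none → altScan arr B m L ≤ m' - B) →
      (∀ m', altScan arr B m L ≤ m' → m' ≤ n → B ≤ m' → cell arr (m' - B) = none →
        altScan arr B m L ≤ m' - B) := by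
  intro m L
  induction m, L using altScan.induct arr B with
  | case1 m L h hrec =>
    intro hmn Habove
    rw [altScan, dif_pos h] at Habove ⊢
    refine hrec (by omega) ?_
    intro m' hlt hle hBm hc
    by_cases heq : m' = m
    · subst heq
      have hcj : (PySem.List.pyGet? arr (m' - B)).join = none := hc
      rw [dif_pos hcj]
      exact le_trans (scan_le arr B _ _) (by omega)
    · exact Habove m' (by omega) hle hBm hc
  | case2 m L h =>
    intro hmn Habove
    rw [altScan, dif_neg h] at Habove ⊢
    intro m' hRm hle hBm hc
    by_cases hlt' : m < m'
    · exact Habove m' hlt' hle hBm hc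
    · omega

theorem scan_closed (arr : List (Option Int)) (B n : Int) :
    Closed arr B n (altScan arr B n n) := by
  intro m hRm hle hBm hc
  exact scan_closed_gen arr B n n n le_rfl (fun m' h1 h2 _ _ => absurd h2 (by omega))
    m hRm hle hBm hc

theorem scan_ge_closed (arr : List (Option Int)) {B n l : Int} (hcl : Closed arr B n l) :
    ∀ m L, m ≤ n → l ≤ L → l ≤ altScan arr B m L := by
  intro m L
  induction m, L using altScan.induct arr B with
  | case1 m L h hrec =>
    intro hmn hlL
    rw [altScan, dif_pos h]
    refine hrec (by omega) ?_
    by_cases hc : cell arr (m - B) = none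
    · have hcj : (PySem.List.pyGet? arr (m - B)).join = none := hc
      rw [dif_pos hcj]
      exact le_min hlL (hcl m (by omega) hmn h.1 hc)
    · have hcj : ¬ (PySem.List.pyGet? arr (m - B)).join = none := hc
      rw [dif_neg hcj]; exact hlL
  | case2 m L h =>
    intro hmn hlL
    rw [altScan, dif_neg h]; exact hlL

-- the nodes the memoized recursion from n can touch
inductive Reach (arr : List (Option Int)) (B n : Int) : Int → Prop
  | top : Reach arr B n n
  | step : ∀ m' m, Reach arr B n m' → B ≤ m' → cell arr (m' - B) = none →
      m' - B ≤ m → m ≤ m' - 1 → Reach arr B n m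

theorem scan_reach_gen (arr : List (Option Int)) (B n : Int) :
    ∀ m L, m ≤ n → (∀ x, L ≤ x → x ≤ n → Reach arr B n x) →
      ∀ x, altScan arr B m L ≤ x → x ≤ n → Reach arr B n x := by
  intro m L
  induction m, L using altScan.induct arr B with
  | case1 m L h hrec =>
    intro hmn Hinv
    rw [altScan, dif_pos h]
    refine hrec (by omega) ?_
    intro x hLx hxn
    by_cases hc : cell arr (m - B) = none
    · have hcj : (PySem.List.pyGet? arr (m - B)).join = none := hc
      rw [dif_pos hcj] at hLx
      by_cases hx : L ≤ x
      · exact Hinv x hx hxn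
      · exact Reach.step m x (Hinv m h.2 hmn) h.1 hc (by omega) (by omega)
    · have hcj : ¬ (PySem.List.pyGet? arr (m - B)).join = none := hc
      rw [dif_neg hcj] at hLx
      exact Hinv x hLx hxn
  | case2 m L h =>
    intro hmn Hinv
    rw [altScan, dif_neg h]
    exact fun x hLx hxn => Hinv x hLx hxn

theorem scan_reach (arr : List (Option Int)) (B n : Int) :
    ∀ x, altScan arr B n n ≤ x → x ≤ n → Reach arr B n x := by
  exact scan_reach_gen arr B n n n le_rfl
    (fun x h1 h2 => by rw [le_antisymm h2 h1]; exact Reach.top)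

-- fill every still-None cell of positions [lo, hi] with its specification value
def Fills (B lo hi : Int) (arr : List (Option Int)) : List (Option Int) :=
  arr.mapIdx (fun j x =>
    if x = none ∧ lo ≤ (j : Int) ∧ (j : Int) ≤ hi then some (V B arr ((j : Int) + B)) else x)

theorem length_Fills (B lo hi : Int) (arr : List (Option Int)) :
    (Fills B lo hi arr).length = arr.length := by
  simp [Fills]

theorem cell_Fills (B lo hi : Int) (arr : List (Option Int)) (p : Int) (hp : 0 ≤ p) :
    cell (Fills B lo hi arr) p =
      if cell arr p = none ∧ lo ≤ p ∧ p ≤ hi ∧ p < (arr.length : Int)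
      then some (V B arr (p + B)) else cell arr p := by
  rw [cell_eq_getD _ _ hp, cell_eq_getD _ _ hp]
  by_cases hl : p < (arr.length : Int)
  · have hj : p.toNat < arr.length := by omega
    have hcast : ((p.toNat : Int)) = p := by omega
    rw [List.getD_eq_getElem?_getD, List.getD_eq_getElem?_getD,
      List.getElem?_eq_getElem (by simpa [Fills] using hj), List.getElem?_eq_getElem hj]
    simp only [Fills, List.getElem_mapIdx, hcast, Option.getD_some]
    by_cases hc : arr[p.toNat] = none
    · simp [hc, hl]
    · simp [hc, hl]
  · have h1 : (Fills B lo hi arr).length ≤ p.toNat := by simp [Fills]; omega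
    have h2 : arr.length ≤ p.toNat := by omega
    rw [List.getD_eq_getElem?_getD, List.getD_eq_getElem?_getD,
      List.getElem?_eq_none h1, List.getElem?_eq_none h2]
    simp [hl]

theorem Fills_empty (B lo hi : Int) (arr : List (Option Int)) (h : hi < lo) :
    Fills B lo hi arr = arr := by
  unfold Fills
  apply List.ext_getElem (by simp)
  intro j h1 h2
  simp only [List.getElem_mapIdx]
  have : ¬ (arr[j] = none ∧ lo ≤ (j:Int) ∧ (j:Int) ≤ hi) := by
    rintro ⟨-, h3, h4⟩; omega
  rw [if_neg this]

theorem cell_natCast (arr : List (Option Int)) (j : Nat) (h : j < arr.length) :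
    cell arr (j : Int) = arr[j] := by
  rw [cell_eq_getD _ _ (by positivity)]
  simp [List.getD_eq_getElem?_getD, List.getElem?_eq_getElem h]

theorem VExt_Fills (B lo hi : Int) (arr : List (Option Int)) : VExt B arr (Fills B lo hi arr) := by
  refine ⟨length_Fills B lo hi arr, fun p hp hl => ?_⟩
  rw [cell_Fills B lo hi arr p hp]
  split
  · next h => exact Or.inr ⟨h.1, rfl⟩
  · exact Or.inl rfl

-- growing the filled region by one position
theorem Fills_set_succ {B lo : Int} {arr : List (Option Int)} {t : Int}
    (h0 : 0 ≤ t - B) (hlo : lo ≤ t - B) (hc : cell arr (t - B) = none) :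
    (Fills B lo (t - 1 - B) arr).set (t - B).toNat (some (V B arr t)) =
      Fills B lo (t - B) arr := by
  apply List.ext_getElem (by simp [Fills])
  intro j h1 h2
  have hja : j < arr.length := by rw [length_Fills] at h2; exact h2
  rw [List.getElem_set]
  simp only [Fills, List.getElem_mapIdx]
  by_cases hj : (t - B).toNat = j
  · rw [if_pos hj]
    have hjt : (j : Int) = t - B := by omega
    have harr : arr[j] = none := by rw [← cell_natCast arr j hja, hjt]; exact hc
    have c2 : lo ≤ (j:Int) := by rw [hjt]; exact hlo
    have c3 : (j:Int) ≤ t - B := le_of_eq hjt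
    rw [if_pos ⟨harr, c2, c3⟩, hjt, show t - B + B = t by ring]
  · rw [if_neg hj]
    have hne : (j : Int) ≠ t - B := by omega
    by_cases hcj : arr[j] = none
    · by_cases hr : lo ≤ (j:Int) ∧ (j:Int) ≤ t - 1 - B
      · rw [if_pos ⟨hcj, hr.1, hr.2⟩, if_pos ⟨hcj, hr.1, by omega⟩]
      · rw [if_neg (by rintro ⟨-, a, b⟩; exact hr ⟨a, by omega⟩),
          if_neg (by rintro ⟨-, a, b⟩; exact hr ⟨a, by omega⟩)]
    · rw [if_neg (by rintro ⟨a, -⟩; exact hcj a), if_neg (by rintro ⟨a, -⟩; exact hcj a)]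

theorem Fills_ext_nofill {B lo : Int} {arr : List (Option Int)} {t : Int}
    (hc : cell arr (t - B) ≠ none) :
    Fills B lo (t - 1 - B) arr = Fills B lo (t - B) arr := by
  apply List.ext_getElem (by simp [Fills])
  intro j h1 h2
  have hja : j < arr.length := by rw [length_Fills] at h2; exact h2
  simp only [Fills, List.getElem_mapIdx]
  by_cases hj : (j : Int) = t - B
  · have harr : arr[j] ≠ none := by rw [← cell_natCast arr j hja, hj]; exact hc
    rw [if_neg (by rintro ⟨a, -⟩; exact harr a), if_neg (by rintro ⟨a, -⟩; exact harr a)]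
  · by_cases hcj : arr[j] = none
    · by_cases hr : lo ≤ (j:Int) ∧ (j:Int) ≤ t - 1 - B
      · rw [if_pos ⟨hcj, hr.1, hr.2⟩, if_pos ⟨hcj, hr.1, by omega⟩]
      · rw [if_neg (by rintro ⟨-, a, b⟩; exact hr ⟨a, by omega⟩),
          if_neg (by rintro ⟨-, a, b⟩; exact hr ⟨a, by omega⟩)]
    · rw [if_neg (by rintro ⟨a, -⟩; exact hcj a), if_neg (by rintro ⟨a, -⟩; exact hcj a)]

-- window sum of the B specification values below t
def W (B : Int) (arr : List (Option Int)) (t : Int) : Int :=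
  ((PySem.List.pyRange (t - B) t 1).map (V B arr)).sum

theorem sum_map_range_int (n : Nat) (f : Nat → Int) :
    ((List.range n).map f).sum = ∑ i ∈ Finset.range n, f i := by
  induction n with
  | zero => simp
  | succ k ih =>
      rw [List.range_succ, Finset.sum_range_succ, List.map_append, List.sum_append, ih]
      simp

theorem W_eq_V_blank {B n : Int} (arr : List (Option Int)) (hB : 0 ≤ B) (hn : ¬ n < B)
    (hc : cell arr (n - B) = none) : W B arr n = V B arr n := by
  rw [V_blank arr hn hc]
  unfold W
  rw [PySem.List.pyRange_one, PySem.List.pyRange_one, List.map_map, List.map_map,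
    sum_map_range_int, sum_map_range_int]
  have hN : (n - (n - B)).toNat = (B + 1 - 1).toNat := by omega
  rw [hN]
  rw [← Finset.sum_range_reflect]
  refine Finset.sum_congr rfl (fun j hj => ?_)
  have hj' := Finset.mem_range.1 hj
  simp only [Function.comp]
  congr 1
  omega

theorem W_slide {B : Int} (arr : List (Option Int)) (hB : 0 ≤ B) (t : Int) :
    W B arr (t + 1) = W B arr t + V B arr t - V B arr (t - B) := by
  rcases eq_or_lt_of_le hB with hB0 | hB1
  · have e0 : t - B = t := by omega
    have h1 : W B arr (t+1) = 0 := by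
      unfold W
      rw [PySem.List.pyRange_one_eq_nil (by omega)]
      simp
    have h2 : W B arr t = 0 := by
      unfold W
      rw [PySem.List.pyRange_one_eq_nil (by omega)]
      simp
    rw [h1, h2, e0]
    ring
  · unfold W
    have e1 : t + 1 - B = t - B + 1 := by ring
    rw [e1, PySem.List.pyRange_one_succ_right (by omega : t - B + 1 ≤ t),
      PySem.List.pyRange_one_cons (by omega : t - B < t)]
    simp only [List.map_append, List.sum_append, List.map_cons, List.sum_cons,
      List.map_nil, List.sum_nil]
    ring

-- value lookups below the fill frontier agree with the specification values
theorem val_low {B n L k : Int} {arr : List (Option Int)} (hcl : Closed arr B n L)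
    (hLk : L ≤ k) (hk : k < L + B) (hkn : k ≤ n) : altVal arr B k = V B arr k := by
  unfold altVal
  by_cases hkB : k < B
  · rw [if_pos hkB, V_base arr hkB]
  · rw [if_neg hkB]
    have hfold : (PySem.List.pyGet? arr (k - B)).join = cell arr (k - B) := rfl
    rw [hfold]
    cases hcc : cell arr (k - B) with
    | none => exact absurd (hcl k hLk hkn (by omega) hcc) (by omega)
    | some v => rw [V_memo arr hkB hcc]; rfl

theorem val_Fills {B n L hi k : Int} {arr : List (Option Int)} (hB : 0 ≤ B)
    (hcl : Closed arr B n L) (hL0 : 0 ≤ L) (hLk : L ≤ k) (hkn : k ≤ n)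
    (hlen : n - B < (arr.length : Int)) (hhi : k ≤ hi + B) :
    altVal (Fills B L hi arr) B k = V B arr k := by
  unfold altVal
  by_cases hkB : k < B
  · rw [if_pos hkB, V_base arr hkB]
  · rw [if_neg hkB]
    have hfold : (PySem.List.pyGet? (Fills B L hi arr) (k - B)).join
        = cell (Fills B L hi arr) (k - B) := rfl
    rw [hfold, cell_Fills B L hi arr (k - B) (by omega)]
    cases hcc : cell arr (k - B) with
    | some v => rw [if_neg (by rintro ⟨h1, -⟩; cases h1), V_memo arr hkB hcc]; rfl
    | none =>
        have hck : L ≤ k - B := hcl k hLk hkn (by omega) hcc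
        rw [if_pos ⟨rfl, hck, by omega, by omega⟩]
        rw [show k - B + B = k by ring]
        rfl

-- the characterization of B's fill loop
theorem loop_inv {B U n : Int} {arr : List (Option Int)} (hB : 0 ≤ B) (hn : B ≤ n)
    (hlen : n - B < (arr.length : Int)) (hc : cell arr (n - B) = none) :
    ∀ t, altScan arr B n n + B ≤ t → t ≤ n + 1 →
    (PySem.List.pyRange (altScan arr B n n + B) t 1).foldl
      (fun (acc : Int × List (Option Int)) m =>
        let a' := if (PySem.List.pyGet? acc.2 (m - B)).join = none
                  then acc.2.set (m - B).toNat (some acc.1) else acc.2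
        (acc.1 + ((PySem.List.pyGet? a' (m - B)).join).getD 0 - altVal a' B (m - B), a'))
      (((PySem.List.pyRange (altScan arr B n n + B - B) (altScan arr B n n + B) 1).map (altVal arr B)).sum, arr)
    = (W B arr t, Fills B (altScan arr B n n) (t - 1 - B) arr) := by
  have hcl := scan_closed arr B n
  have hL0 : 0 ≤ altScan arr B n n := scan_nonneg arr hB n n (by omega)
  have hLtop : altScan arr B n n ≤ n - B := scan_le_top arr hn hc
  set L := altScan arr B n n with hLdef
  intro t hst
  induction t, hst using Int.le_induction with
  | base =>
      intro _
      rw [PySem.List.pyRange_one_eq_nil (le_refl (L + B)), List.foldl_nil,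
        Fills_empty B L (L + B - 1 - B) arr (by omega)]
      congr 1
      unfold W
      refine congrArg List.sum (List.map_congr_left fun k hk => ?_)
      have hk' := PySem.List.mem_pyRange_one.1 hk
      exact val_low hcl (by omega) (by omega) (by omega)
  | succ t ht IH =>
      intro htn
      have IH' := IH (by omega)
      rw [PySem.List.pyRange_one_succ_right (by omega : L + B ≤ t), List.foldl_append, IH',
        List.foldl_cons, List.foldl_nil]
      have hFtop : cell (Fills B L (t - 1 - B) arr) (t - B) = cell arr (t - B) := by
        rw [cell_Fills B L (t - 1 - B) arr (t - B) (by omega),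
          if_neg (by rintro ⟨-, -, h3, -⟩; omega)]
      have hfold : (PySem.List.pyGet? (Fills B L (t - 1 - B) arr) (t - B)).join
          = cell (Fills B L (t - 1 - B) arr) (t - B) := rfl
      rw [hfold, hFtop]
      by_cases hcm : cell arr (t - B) = none
      · rw [if_pos hcm]
        dsimp only
        have hWt : W B arr t = V B arr t := W_eq_V_blank arr hB (by omega) hcm
        rw [hWt, Fills_set_succ (by omega) (by omega) hcm]
        have hcell : cell (Fills B L (t - B) arr) (t - B) = some (V B arr t) := by
          rw [cell_Fills B L (t - B) arr (t - B) (by omega),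
            if_pos ⟨hcm, by omega, le_refl (t - B), by omega⟩, show t - B + B = t by ring]
        have hfold2 : (PySem.List.pyGet? (Fills B L (t - B) arr) (t - B)).join
            = cell (Fills B L (t - B) arr) (t - B) := rfl
        rw [hfold2, hcell]
        have hval : altVal (Fills B L (t - B) arr) B (t - B) = V B arr (t - B) :=
          val_Fills hB hcl hL0 (by omega) (by omega) hlen (by omega)
        rw [hval]
        rw [show t + 1 - 1 - B = t - B by ring]
        congr 1
        rw [W_slide arr hB t, hWt]
        simp
      · rw [if_neg hcm]
        dsimp only
        obtain ⟨v, hv⟩ := Option.ne_none_iff_exists'.mp hcm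
        rw [hfold, hFtop, hv]
        have hVt : V B arr t = v := V_memo arr (by omega) hv
        have hval : altVal (Fills B L (t - 1 - B) arr) B (t - B) = V B arr (t - B) := by
          rcases eq_or_lt_of_le hB with hB0 | hB1
          · unfold altVal
            rw [if_neg (by omega)]
            have hfold3 : (PySem.List.pyGet? (Fills B L (t - 1 - B) arr) (t - B - B)).join
                = cell (Fills B L (t - 1 - B) arr) (t - B - B) := rfl
            rw [hfold3, show t - B - B = t - B by omega, hFtop, hv,
              show t - B = t by omega, hVt]
            rfl
          · exact val_Fills hB hcl hL0 (by omega) (by omega) hlen (by omega)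
        rw [hval]
        rw [show t + 1 - 1 - B = t - B by ring, Fills_ext_nofill (B := B) (lo := L) (t := t) hcm]
        congr 1
        rw [W_slide arr hB t, hVt]
        simp

theorem alt_char {B U n : Int} {arr : List (Option Int)} (hB : 0 ≤ B) (hn : B ≤ n)
    (hlen : n - B < (arr.length : Int)) (hc : cell arr (n - B) = none) :
    sol_help_alt n arr B U = (V B arr n, Fills B (altScan arr B n n) (n - B) arr) := by
  have hn' : ¬ n < B := by omega
  have h0 : (0:Int) ≤ n - B := by omega
  have hLtop : altScan arr B n n ≤ n - B := scan_le_top arr hn hc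
  have hget : PySem.List.pyGet? arr (n - B) = some none := by
    have hcd := hc
    rw [cell_eq_getD _ _ h0, List.getD_eq_getElem?_getD,
      List.getElem?_eq_getElem (by omega)] at hcd
    rw [PySem.List.pyGet?_of_nonneg arr h0, List.getElem?_eq_getElem (by omega)]
    simpa using hcd
  unfold sol_help_alt
  rw [if_neg hn', hget]
  dsimp only
  rw [loop_inv (U := U) hB hn hlen hc (n + 1) (by omega) (le_refl (n + 1))]
  dsimp only
  have hfold : (PySem.List.pyGet? (Fills B (altScan arr B n n) (n + 1 - 1 - B) arr) (n - B)).join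
      = cell (Fills B (altScan arr B n n) (n + 1 - 1 - B) arr) (n - B) := rfl
  rw [hfold, show n + 1 - 1 - B = n - B by ring,
    cell_Fills B (altScan arr B n n) (n - B) arr (n - B) h0,
    if_pos ⟨hc, hLtop, le_refl (n - B), by omega⟩, show n - B + B = n by ring]
  rfl

theorem loop_len (B U : Int) : ∀ (l : List Int) (acc : Int × List (Option Int)),
    ((l.foldl (fun (acc : Int × List (Option Int)) m =>
        let a' := if (PySem.List.pyGet? acc.2 (m - B)).join = none
                  then acc.2.set (m - B).toNat (some acc.1) else acc.2
        (acc.1 + ((PySem.List.pyGet? a' (m - B)).join).getD 0 - altVal a' B (m - B), a')) acc).2).length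
      = acc.2.length := by
  intro l
  induction l with
  | nil => intro acc; rfl
  | cons c cs ih =>
      intro acc
      rw [List.foldl_cons, ih]
      dsimp only
      split <;> simp

theorem length_alt (n : Int) (arr : List (Option Int)) (B U : Int) :
    (sol_help_alt n arr B U).2.length = arr.length := by
  unfold sol_help_alt
  by_cases h : n < B
  · rw [if_pos h]
  · rw [if_neg h]
    cases hm : PySem.List.pyGet? arr (n - B) with
    | none => rfl
    | some o =>
        cases o with
        | some v => rfl
        | none =>
            dsimp only
            exact loop_len B U _ _

-- sequential processing of child calls (A's inner loop, resp. with B's port)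
def procC (B U : Int) : List Int → Int × List (Option Int) → Int × List (Option Int)
  | [], acc => acc
  | c :: cs, acc =>
      let p := sol_help c acc.2 B U
      procC B U cs (acc.1 + p.1, p.2)

def procAlt (B U : Int) : List Int → Int × List (Option Int) → Int × List (Option Int)
  | [], acc => acc
  | c :: cs, acc =>
      let p := sol_help_alt c acc.2 B U
      procAlt B U cs (acc.1 + p.1, p.2)

-- invariant carried through A's sequential child calls (state a after children 1..i0-1)
def StInv (B n L : Int) (arr a : List (Option Int)) (i0 : Int) : Prop :=
  VExt B arr a
  ∧ (∀ p : Int, 0 ≤ p → cell a p ≠ cell arr p → L ≤ p ∧ p ≤ n - 1 - B)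
  ∧ (∀ u : Int, B ≤ u → u ≤ n → cell a (u - B) ≠ none → cell arr (u - B) = none →
       ∀ x : Int, u - B ≤ x → x ≤ u - 1 → B ≤ x → cell arr (x - B) = none → cell a (x - B) ≠ none)
  ∧ (∀ i : Int, 1 ≤ i → i < i0 → B ≤ n - i → cell arr (n - i - B) = none → cell a (n - i - B) ≠ none)

theorem cell_Fills_ne_none {B lo hi : Int} {a : List (Option Int)} {p : Int} (hp : 0 ≤ p)
    (h : cell a p ≠ none) : cell (Fills B lo hi a) p = cell a p := by
  rw [cell_Fills B lo hi a p hp, if_neg (by rintro ⟨h1, -⟩; exact h h1)]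

theorem alt_memo {B U n v : Int} {a : List (Option Int)} (hn' : ¬ n < B)
    (hv : cell a (n - B) = some v) : sol_help_alt n a B U = (v, a) := by
  have hg : PySem.List.pyGet? a (n - B) = some (some v) := by
    have hj := hv; unfold cell at hj
    cases hgg : PySem.List.pyGet? a (n - B) <;> rw [hgg] at hj <;> simp_all
  unfold sol_help_alt
  rw [if_neg hn', hg]

theorem A_memo {B U n v : Int} {a : List (Option Int)} (hn' : ¬ n < B)
    (hv : cell a (n - B) = some v) : sol_help n a B U = (v, a) := by
  have hg : PySem.List.pyGet? a (n - B) = some (some v) := by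
    have hj := hv; unfold cell at hj
    cases hgg : PySem.List.pyGet? a (n - B) <;> rw [hgg] at hj <;> simp_all
  rw [sol_help]
  rw [dif_neg hn', hg]

theorem step_child {B U n L : Int} {arr a : List (Option Int)} (hB : 0 ≤ B) (hn : B ≤ n)
    (hlen : n - B < (arr.length : Int)) (hcl : Closed arr B n L) (hL0 : 0 ≤ L)
    (hLtop : L ≤ n - B) {i0 : Int} (hi1 : 1 ≤ i0) (hiB : i0 ≤ B)
    (hinv : StInv B n L arr a i0) :
    (sol_help_alt (n - i0) a B U).1 = V B arr (n - i0) ∧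
      StInv B n L arr (sol_help_alt (n - i0) a B U).2 (i0 + 1) := by
  have hlena : a.length = arr.length := hinv.1.1
  by_cases hcB : n - i0 < B
  · have he : sol_help_alt (n - i0) a B U = (n - i0, a) := by
      unfold sol_help_alt; rw [if_pos hcB]
    rw [he]
    refine ⟨(V_base arr hcB).symm, hinv.1, hinv.2.1, hinv.2.2.1, ?_⟩
    intro i h1 h2 hBni hblank
    by_cases hio : i = i0
    · subst hio; omega
    · exact hinv.2.2.2 i h1 (by omega) hBni hblank
  · have h0c : (0:Int) ≤ n - i0 - B := by omega
    have hclen : n - i0 - B < (a.length : Int) := by rw [hlena]; omega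
    cases hca : cell a (n - i0 - B) with
    | some v =>
        have he := alt_memo (B := B) (U := U) hcB hca
        rw [he]
        have hva : V B a (n - i0) = v := V_memo a hcB hca
        refine ⟨(by show v = V B arr (n - i0); rw [← V_VExt hinv.1]; exact hva.symm), hinv.1, hinv.2.1, hinv.2.2.1, ?_⟩
        intro i h1 h2 hBni hblank
        by_cases hio : i = i0
        · subst hio; rw [hca]; simp
        · exact hinv.2.2.2 i h1 (by omega) hBni hblank
    | none =>
        have hcarr : cell arr (n - i0 - B) = none := VExt_cell_none hinv.1 h0c hca
        have he := alt_char (U := U) (n := n - i0) (arr := a) hB (by omega) hclen hca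
        rw [he]
        have hclA := scan_closed a B (n - i0)
        have hL'0 : 0 ≤ altScan a B (n - i0) (n - i0) := scan_nonneg a hB _ _ (by omega)
        have hL'top : altScan a B (n - i0) (n - i0) ≤ n - i0 - B := scan_le_top a (by omega) hca
        have hLL' : L ≤ altScan a B (n - i0) (n - i0) := by
          refine scan_ge_closed a ?_ (n - i0) (n - i0) le_rfl (by omega)
          intro m hLm hmc hBm hnone
          exact hcl m hLm (by omega) hBm (VExt_cell_none hinv.1 (by omega) hnone)
        set L' := altScan a B (n - i0) (n - i0) with hL'def
        constructor
        · exact V_VExt hinv.1 (n - i0)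
        refine ⟨VExt_trans hinv.1 (VExt_Fills B L' (n - i0 - B) a), ?_, ?_, ?_⟩
        · intro p hp hne
          rw [cell_Fills B L' (n - i0 - B) a p hp] at hne
          by_cases hcond : cell a p = none ∧ L' ≤ p ∧ p ≤ n - i0 - B ∧ p < (a.length : Int)
          · exact ⟨by omega, by omega⟩
          · rw [if_neg hcond] at hne
            exact hinv.2.1 p hp hne
        · intro u hBu hun hfill hblank x hx1 hx2 hBx hxblank
          rw [cell_Fills B L' (n - i0 - B) a (u - B) (by omega)] at hfill
          by_cases hfa : cell a (u - B) = none
          · by_cases hcond : cell a (u - B) = none ∧ L' ≤ u - B ∧ u - B ≤ n - i0 - B ∧ (u - B) < (a.length : Int)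
            · by_cases hxa : cell a (x - B) = none
              · have hclx : L' ≤ x - B := hclA x (by omega) (by omega) hBx hxa
                rw [cell_Fills B L' (n - i0 - B) a (x - B) (by omega),
                  if_pos ⟨hxa, hclx, by omega, by rw [hlena]; omega⟩]
                simp
              · rw [cell_Fills_ne_none (by omega) hxa]
                exact hxa
            · rw [if_neg hcond] at hfill
              exact absurd hfa hfill
          · have hold := hinv.2.2.1 u hBu hun hfa hblank x hx1 hx2 hBx hxblank
            rw [cell_Fills_ne_none (by omega) hold]
            exact hold
        · intro i h1 h2 hBni hblank
          by_cases hio : i = i0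
          · rw [hio]
            rw [cell_Fills B L' (n - i0 - B) a (n - i0 - B) h0c,
              if_pos ⟨hca, hL'top, le_refl (n - i0 - B), hclen⟩]
            simp
          · have hold := hinv.2.2.2 i h1 (by omega) hBni hblank
            rw [cell_Fills_ne_none (by omega) hold]
            exact hold

theorem run_children {B U n L : Int} {arr : List (Option Int)} (hB : 0 ≤ B) (hn : B ≤ n)
    (hlen : n - B < (arr.length : Int)) (hcl : Closed arr B n L) (hL0 : 0 ≤ L)
    (hLtop : L ≤ n - B) :
    ∀ (k : Nat) (i0 : Int), (B + 1 - i0).toNat = k → 1 ≤ i0 → i0 ≤ B + 1 →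
    ∀ (s : Int) (a : List (Option Int)), StInv B n L arr a i0 →
    ∃ aF, procAlt B U ((PySem.List.pyRange i0 (B+1) 1).map (fun i => n - i)) (s, a)
      = (s + ((PySem.List.pyRange i0 (B+1) 1).map (fun i => V B arr (n - i))).sum, aF)
      ∧ StInv B n L arr aF (B + 1) := by
  intro k
  induction k using Nat.strong_induction_on with
  | _ k IH =>
  intro i0 hk h1 h2 s a hinv
  by_cases hend : B + 1 ≤ i0
  · have hi0 : i0 = B + 1 := by omega
    subst hi0
    rw [PySem.List.pyRange_one_eq_nil le_rfl]
    exact ⟨a, by simp [procAlt], hinv⟩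
  · rw [PySem.List.pyRange_one_cons (by omega : i0 < B + 1), List.map_cons]
    have hstep := step_child (U := U) hB hn hlen hcl hL0 hLtop h1 (by omega) hinv
    obtain ⟨aF, heq, hfin⟩ := IH (B + 1 - (i0 + 1)).toNat (by omega) (i0 + 1) rfl (by omega)
      (by omega) (s + (sol_help_alt (n - i0) a B U).1) (sol_help_alt (n - i0) a B U).2 hstep.2
    refine ⟨aF, ?_, hfin⟩
    rw [show procAlt B U ((n - i0) :: (PySem.List.pyRange (i0+1) (B+1) 1).map (fun i => n - i)) (s, a)
        = procAlt B U ((PySem.List.pyRange (i0+1) (B+1) 1).map (fun i => n - i))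
            (s + (sol_help_alt (n - i0) a B U).1, (sol_help_alt (n - i0) a B U).2) from rfl,
      heq, List.map_cons, List.sum_cons, hstep.1]
    refine congrArg (fun z => (z, aF)) ?_
    ring

theorem reach_le {arr : List (Option Int)} {B n : Int} :
    ∀ m, Reach arr B n m → m ≤ n := by
  intro m h
  induction h with
  | top => exact le_rfl
  | step m' m hr hBm' hnone h1 h2 ih => omega

theorem reach_filled {B U n L : Int} {arr aF : List (Option Int)}
    (hinv : StInv B n L arr aF (B + 1)) :
    ∀ m, Reach arr B n m → B ≤ m → cell arr (m - B) = none →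
      cell aF (m - B) ≠ none ∨ m = n := by
  intro m h
  induction h with
  | top => exact fun _ _ => Or.inr rfl
  | step m' m hr hBm' hnone h1 h2 ih =>
      intro hBm hblank
      rcases ih hBm' hnone with hfill | htop
      · exact Or.inl (hinv.2.2.1 m' hBm' (reach_le m' hr) hfill hnone m h1 h2 hBm hblank)
      · have e : n - (n - m) = m := by ring
        have := hinv.2.2.2 (n - m) (by omega) (by omega) (by rw [e]; exact hBm) (by rw [e]; exact hblank)
        rw [e] at this
        exact Or.inl this

theorem cell_ext {a b : List (Option Int)} (hlen : a.length = b.length)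
    (h : ∀ p : Int, 0 ≤ p → p < (a.length : Int) → cell a p = cell b p) : a = b := by
  apply List.ext_getElem hlen
  intro j h1 h2
  have hcl := h j (by positivity) (by omega)
  rw [cell_natCast a j h1, cell_natCast b j h2] at hcl
  exact hcl

theorem comp_final {B U n : Int} {arr aF : List (Option Int)} (hB : 0 ≤ B) (hn : B ≤ n)
    (hlen : n - B < (arr.length : Int))
    (hinv : StInv B n (altScan arr B n n) arr aF (B + 1)) :
    aF = Fills B (altScan arr B n n) (n - 1 - B) arr := by
  have hlena : aF.length = arr.length := hinv.1.1
  apply cell_ext (by rw [hlena, length_Fills])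
  intro p hp hplen
  rw [hlena] at hplen
  rw [cell_Fills B (altScan arr B n n) (n - 1 - B) arr p hp]
  cases hcp : cell arr p with
  | some v =>
      rw [if_neg (by rintro ⟨h1, -⟩; cases h1)]
      exact VExt_cell_some hinv.1 hp hcp
  | none =>
      by_cases hreg : altScan arr B n n ≤ p ∧ p ≤ n - 1 - B
      · have hr : Reach arr B n (p + B) := scan_reach arr B n (p + B) (by omega) (by omega)
        have e : p + B - B = p := by ring
        rcases reach_filled (U := U) hinv (p + B) hr (by omega) (by rw [e]; exact hcp) with hfill | htop
        · rw [e] at hfill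
          have hval := VExt_cell_val hinv.1 hp (by rw [hcp]; exact hfill)
          rw [if_pos ⟨rfl, hreg.1, hreg.2, by omega⟩]
          exact hval.2
        · omega
      · have hsame : cell aF p = cell arr p := by
          by_contra hne
          exact hreg ⟨(hinv.2.1 p hp hne).1, (hinv.2.1 p hp hne).2⟩
        rw [if_neg (by rintro ⟨-, a2, a3, -⟩; exact hreg ⟨a2, a3⟩), hsame, hcp]

theorem procC_foldl (B U n : Int) : ∀ (l : List Int) (acc : Int × List (Option Int)),
    (l.foldl (fun (acc : Int × List (Option Int)) i =>
        let p := sol_help (n - i) acc.2 B U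
        (acc.1 + p.1, p.2)) acc)
      = procC B U (l.map (fun i => n - i)) acc := by
  intro l
  induction l with
  | nil => intro acc; rfl
  | cons c cs ihc => intro acc; rw [List.foldl_cons, List.map_cons, procC, ihc]

theorem main_equiv (B U : Int) : ∀ (k : Nat) (n : Int) (arr : List (Option Int)),
    (n - B + 1).toNat = k →
    (¬ n < B → 0 ≤ B ∧ n - B < (arr.length : Int)) →
    sol_help n arr B U = sol_help_alt n arr B U := by
  intro k
  induction k using Nat.strong_induction_on with
  | _ k IH =>
  intro n arr hk hpre
  by_cases hnb : n < B
  · have hA : sol_help n arr B U = (n, arr) := by rw [sol_help]; rw [dif_pos hnb]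
    have hBs : sol_help_alt n arr B U = (n, arr) := by unfold sol_help_alt; rw [if_pos hnb]
    rw [hA, hBs]
  · obtain ⟨hB, hlen⟩ := hpre hnb
    have hn : B ≤ n := by omega
    have h0 : (0:Int) ≤ n - B := by omega
    cases hcc : cell arr (n - B) with
    | some v => rw [A_memo hnb hcc, alt_memo hnb hcc]
    | none =>
        have hg : PySem.List.pyGet? arr (n - B) = some none := by
          have hj := hcc; unfold cell at hj
          cases hgg : PySem.List.pyGet? arr (n - B) <;> rw [hgg] at hj <;> simp_all
        have hcl := scan_closed arr B n
        have hL0 : 0 ≤ altScan arr B n n := scan_nonneg arr hB n n (by omega)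
        have hLtop : altScan arr B n n ≤ n - B := scan_le_top arr hn hcc
        have hA : sol_help n arr B U =
            ((procC B U ((PySem.List.pyRange 1 (B+1) 1).map (fun i => n - i)) (0, arr)).1,
             (procC B U ((PySem.List.pyRange 1 (B+1) 1).map (fun i => n - i)) (0, arr)).2.set
               (n - B).toNat
               (some (procC B U ((PySem.List.pyRange 1 (B+1) 1).map (fun i => n - i)) (0, arr)).1)) := by
          rw [sol_help]
          rw [dif_neg hnb, hg]
          dsimp only
          rw [List.foldl_attach (f := fun (acc : Int × List (Option Int)) (i : Int) =>
                let p := sol_help (n - i) acc.2 B U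
                (acc.1 + p.1, p.2)),
            procC_foldl B U n]
        have hproc : ∀ (cs : List Int) (acc : Int × List (Option Int)),
            (∀ c ∈ cs, n - B ≤ c ∧ c ≤ n - 1) → acc.2.length = arr.length →
            procC B U cs acc = procAlt B U cs acc := by
          intro cs
          induction cs with
          | nil => intro acc _ _; rfl
          | cons c cs ihc =>
              intro acc hmem hlena
              have hbd := hmem c List.mem_cons_self
              have hcall : sol_help c acc.2 B U = sol_help_alt c acc.2 B U := by
                refine IH (c - B + 1).toNat (by omega) c acc.2 rfl ?_
                intro hcb
                exact ⟨hB, by rw [hlena]; omega⟩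
              rw [procC, procAlt, hcall]
              exact ihc _ (fun c' hc' => hmem c' (List.mem_cons_of_mem _ hc'))
                (by rw [length_alt]; exact hlena)
        have hmem : ∀ c ∈ (PySem.List.pyRange 1 (B+1) 1).map (fun i => n - i),
            n - B ≤ c ∧ c ≤ n - 1 := by
          intro c hc
          obtain ⟨i, hi, rfl⟩ := List.mem_map.1 hc
          have hi' := PySem.List.mem_pyRange_one.1 hi
          omega
        have hinv0 : StInv B n (altScan arr B n n) arr arr 1 :=
          ⟨VExt_refl B arr, fun p _ hne => absurd rfl hne,
           fun u _ _ hf hb => absurd hb hf,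
           fun i hi1 hi2 _ _ => absurd hi1 (by omega)⟩
        obtain ⟨aF, heq, hfin⟩ := run_children (U := U) hB hn hlen hcl hL0 hLtop
          (B + 1 - 1).toNat 1 rfl le_rfl (by omega) 0 arr hinv0
        have haF : aF = Fills B (altScan arr B n n) (n - 1 - B) arr :=
          comp_final (U := U) hB hn hlen hfin
        rw [hA, hproc _ _ hmem rfl, heq, haF]
        dsimp only
        have hsum : 0 + ((PySem.List.pyRange 1 (B+1) 1).map (fun i => V B arr (n - i))).sum
            = V B arr n := by
          rw [zero_add, ← V_blank arr hnb hcc]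
        rw [hsum, Fills_set_succ (B := B) (lo := altScan arr B n n) (arr := arr) (t := n)
            h0 hLtop hcc]
        exact (alt_char (U := U) hB hn hlen hcc).symm

-- ===== VERDICT (by name: the statement is the Claim_ definition above) =====
theorem sol_help_spec : Claim_equal_sol_help := by
  intro n arr B U _ hpre
  unfold Spec_sol_help
  rcases hpre with h | h | h
  · exact main_equiv B U (n - B + 1).toNat n arr rfl (fun hnb => absurd h hnb)
  · exact main_equiv B U (n - B + 1).toNat n arr rfl (fun _ => h)
  · by_cases hnb : n < B
    · exact main_equiv B U (n - B + 1).toNat n arr rfl (fun h' => absurd hnb h')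
    · obtain ⟨v, hv⟩ := Option.ne_none_iff_exists'.mp h.2.2
      rw [A_memo hnb hv, alt_memo hnb hv]
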